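-- pv_equiv track=rewrite | github.com/DanEhab/ArchAware-PDDL-Configurator | validation_and_evaluation/scripts/test_validation/test_v4_comprehensive.py | alter_remove_type
-- ===== SOURCE A (Python) =====
-- def alter_remove_type(pddl: str) -> str:
--     """T22: Remove the first type line after :types."""
--     lines = pddl.split("\n")
--     for i, l in enumerate(lines):
--         if ":types" in l.lower():
--             # Remove the next non-empty line that has type content
--             for j in range(i + 1, len(lines)):
--                 stripped = lines[j].strip()
--                 if stripped and not stripped.startswith("(:") and stripped != ")":
--                     del lines[j]
--                     return "\n".join(lines)
--     return pddl
-- ===== SOURCE B (Python) =====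
-- def alter_remove_type(pddl: str) -> str:
--     """T22: Remove the first type line after :types (single stateful pass)."""
--     lines = pddl.split("\n")
--     found = False
--     for k, line in enumerate(lines):
--         s = line.strip()
--         if found and s and not s.startswith("(:") and s != ")":
--             del lines[k]
--             return "\n".join(lines)
--         if ":types" in line.lower():
--             found = True
--     return pddl
-- ===== Notes on version B (the rewrite author's own statement) =====
-- stated objective: simpler
-- what changed: A's nested structure (locate the types-declaration line, then an inner scan that deletes the next content line, with outer-loop re-entry) is replaced by a single linear pass over the lines carrying a boolean flag that is checked before it is set.
import Mathlib
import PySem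

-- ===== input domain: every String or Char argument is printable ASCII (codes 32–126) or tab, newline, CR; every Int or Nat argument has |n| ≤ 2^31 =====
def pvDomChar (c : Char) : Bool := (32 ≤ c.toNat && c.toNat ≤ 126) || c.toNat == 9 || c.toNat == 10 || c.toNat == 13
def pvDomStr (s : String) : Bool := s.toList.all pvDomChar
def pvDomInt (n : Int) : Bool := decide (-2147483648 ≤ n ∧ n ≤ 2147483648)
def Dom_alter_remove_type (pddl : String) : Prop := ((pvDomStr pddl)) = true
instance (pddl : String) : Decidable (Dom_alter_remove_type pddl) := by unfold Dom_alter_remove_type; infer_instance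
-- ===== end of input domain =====

-- B replaces A's nested locate-then-inner-scan (with outer-loop re-entry) by one
-- linear pass over the lines carrying a boolean flag (objective: simpler).


-- shared textual predicates (the literal Python conditions, used verbatim by both sources)
-- "stripped and not stripped.startswith('(:') and stripped != ')'"
def pvTypeContent (l : String) : Bool :=
  let stripped := PySem.Str.strip l
  !(stripped == "") && !(PySem.Str.startswith stripped "(:") && !(stripped == ")")

-- "':types' in l.lower()"
def pvHasTypes (l : String) : Bool :=
  PySem.Str.isIn ":types" (PySem.Str.lower l)

-- ===== PORT A =====
-- inner loop: "for j in range(i + 1, len(lines)): …" — walks the suffix lines.drop j,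
-- carrying the numeric index j; on a hit it performs "del lines[j]" as take j ++ drop (j+1)
def pvInnerA (all : List String) : Nat → List String → Option (List String)
  | _, [] => none
  | j, l :: rest =>
    if pvTypeContent l then some (all.take j ++ all.drop (j + 1))
    else pvInnerA all (j + 1) rest

-- outer loop: "for i, l in enumerate(lines): if ':types' in l.lower(): …"
-- (if the inner scan finds nothing the outer loop simply continues)
def pvOuterA (all : List String) : Nat → List String → Option (List String)
  | _, [] => none
  | i, l :: rest =>
    if pvHasTypes l then
      match pvInnerA all (i + 1) rest with
      | some r => some r
      | none => pvOuterA all (i + 1) rest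
    else pvOuterA all (i + 1) rest

def alter_remove_type (pddl : String) : String :=
  -- lines = pddl.split("\n"); sep "\n" ≠ "", so split? never none
  match pvOuterA ((PySem.Str.split? pddl "\n").getD []) 0 ((PySem.Str.split? pddl "\n").getD []) with
  | some r => PySem.Str.join "\n" r
  | none => pddl

-- ===== PORT B =====
-- single pass with a 'found' flag; acc holds the already-seen lines in reverse,
-- so "del lines[k]" on a hit is acc.reverse ++ rest
def pvGoB : Bool → List String → List String → Option (List String)
  | _, _, [] => none
  | found, acc, l :: rest =>
    if found && pvTypeContent l then some (acc.reverse ++ rest)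
    else pvGoB (found || pvHasTypes l) (l :: acc) rest

def alter_remove_type_alt (pddl : String) : String :=
  -- lines = pddl.split("\n"); sep "\n" ≠ "", so split? never none
  match pvGoB false [] ((PySem.Str.split? pddl "\n").getD []) with
  | some r => PySem.Str.join "\n" r
  | none => pddl

-- ===== PRECONDITION & SPEC =====
def Spec_alter_remove_type (pddl : String) (out : String) : Prop := out = alter_remove_type_alt pddl
instance (pddl : String) (out : String) : Decidable (Spec_alter_remove_type pddl out) := by unfold Spec_alter_remove_type; infer_instance

-- ===== CLAIM (what is proved, stated in full; the proofs are below) =====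
def Claim_equal_alter_remove_type : Prop := ∀ (pddl : String), Dom_alter_remove_type pddl → Spec_alter_remove_type pddl (alter_remove_type pddl)

-- ===== LEMMAS AND PROOFS =====

-- with the flag set, B's pass is exactly A's inner scan
theorem pvGoB_true (rest : List String) : ∀ (acc all : List String) (j : Nat),
    all = acc.reverse ++ rest → j = acc.length →
    pvGoB true acc rest = pvInnerA all j rest := by
  induction rest with
  | nil => intro acc all j _ _; simp [pvGoB, pvInnerA]
  | cons l rest ih =>
    intro acc all j hall hj
    simp only [pvGoB, pvInnerA, Bool.true_and]
    by_cases h : pvTypeContent l = true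
    · simp only [h, if_true]
      have hlen : acc.reverse.length = j := by simp [hj]
      have htake : all.take j = acc.reverse := by
        subst hall; exact List.take_left' hlen
      have hdrop : all.drop (j + 1) = rest := by
        subst hall
        have : acc.reverse ++ l :: rest = (acc.reverse ++ [l]) ++ rest := by simp
        rw [this]
        exact List.drop_left' (by simp [hj])
      rw [htake, hdrop]
    · simp only [Bool.not_eq_true] at h
      simp only [h, Bool.false_eq_true, if_false, Bool.true_or]
      exact ih (l :: acc) all (j + 1)
        (by simp [hall]) (by simp [hj])

-- if A's inner scan over a suffix finds nothing, the rest of A's outer loop finds nothing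
theorem pvOuterA_none (rest : List String) : ∀ (all : List String) (j : Nat),
    pvInnerA all j rest = none → pvOuterA all j rest = none := by
  induction rest with
  | nil => intro all j _; simp [pvOuterA]
  | cons l rest ih =>
    intro all j hnone
    simp only [pvInnerA] at hnone
    by_cases h : pvTypeContent l = true
    · simp [h] at hnone
    · simp only [Bool.not_eq_true] at h
      simp only [h, Bool.false_eq_true, if_false] at hnone
      by_cases ht : pvHasTypes l = true
      · simp [pvOuterA, ht, hnone, ih all (j + 1) hnone]
      · simp only [Bool.not_eq_true] at ht
        simp [pvOuterA, ht, ih all (j + 1) hnone]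

-- before the flag is set, B's pass is exactly A's outer loop
theorem pvGoB_false (rest : List String) : ∀ (acc all : List String) (i : Nat),
    all = acc.reverse ++ rest → i = acc.length →
    pvGoB false acc rest = pvOuterA all i rest := by
  induction rest with
  | nil => intro acc all i _ _; simp [pvGoB, pvOuterA]
  | cons l rest ih =>
    intro acc all i hall hi
    simp only [pvGoB, pvOuterA, Bool.false_and, Bool.false_eq_true, if_false, Bool.false_or]
    by_cases ht : pvHasTypes l = true
    · simp only [ht, if_true]
      have hinner : pvGoB true (l :: acc) rest = pvInnerA all (i + 1) rest :=
        pvGoB_true rest (l :: acc) all (i + 1) (by simp [hall]) (by simp [hi])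
      rw [hinner]
      cases hcase : pvInnerA all (i + 1) rest with
      | some r => simp
      | none => simp [pvOuterA_none rest all (i + 1) hcase]
    · simp only [Bool.not_eq_true] at ht
      simp only [ht, Bool.false_eq_true, if_false]
      exact ih (l :: acc) all (i + 1) (by simp [hall]) (by simp [hi])

-- ===== VERDICT (by name: the statement is the Claim_ definition above) =====
theorem alter_remove_type_spec : Claim_equal_alter_remove_type := by
  intro pddl _
  unfold Spec_alter_remove_type alter_remove_type alter_remove_type_alt
  rw [pvGoB_false ((PySem.Str.split? pddl "\n").getD []) [] ((PySem.Str.split? pddl "\n").getD []) 0 (by simp) rfl]
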